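-- pv_equiv track=rewrite | github.com/87xdude/ValoMgr | app/core/ranks.py | _pick_tft_queue
-- ===== SOURCE A (Python) =====
-- from typing import Optional, Tuple
--
-- def _pick_tft_queue(entries: list, wanted: Optional[str]) -> Optional[dict]:
--     alias = (wanted or "").lower()
--     if alias in ("pairs","doubleup","duo","duoqueue"):
--         order = ["RANKED_TFT_PAIRS","RANKED_TFT","RANKED_TFT_TURBO"]
--     elif alias in ("hyper","turbo","hyp"):
--         order = ["RANKED_TFT_TURBO","RANKED_TFT","RANKED_TFT_PAIRS"]
--     else:
--         order = ["RANKED_TFT","RANKED_TFT_PAIRS","RANKED_TFT_TURBO"]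
--     for q in order:
--         for e in entries:
--             if e.get("queueType")==q:
--                 return e
--     return entries[0] if entries else None
-- ===== SOURCE B (Python) =====
-- from typing import Optional
--
-- _PREFERRED = {"pairs": "RANKED_TFT_PAIRS", "doubleup": "RANKED_TFT_PAIRS",
--               "duo": "RANKED_TFT_PAIRS", "duoqueue": "RANKED_TFT_PAIRS",
--               "hyper": "RANKED_TFT_TURBO", "turbo": "RANKED_TFT_TURBO",
--               "hyp": "RANKED_TFT_TURBO"}
--
-- def _pick_tft_queue(entries: list, wanted: Optional[str]) -> Optional[dict]:
--     alias = (wanted or "").lower()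
--     top = _PREFERRED.get(alias, "RANKED_TFT")
--     order = [top] + [q for q in ("RANKED_TFT", "RANKED_TFT_PAIRS", "RANKED_TFT_TURBO") if q != top]
--     rank = {q: i for i, q in enumerate(order)}
--     best = None
--     best_rank = len(order)
--     for e in entries:
--         r = rank.get(e.get("queueType"), len(order))
--         if r < best_rank:
--             best, best_rank = e, r
--     if best is not None:
--         return best
--     return entries[0] if entries else None
-- ===== Notes on version B (the rewrite author's own statement) =====
-- stated objective: alternative
-- what changed: A scans the whole entries list once per preference (priority-major nested loops over three hard-coded branch lists); B derives the order by rotating a default triple behind an alias->preferred-queue map, builds a rank table from enumerate(order), and makes one entries-major argmin pass keeping the first entry of minimal rank, falling back to entries[0].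
import Mathlib
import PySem

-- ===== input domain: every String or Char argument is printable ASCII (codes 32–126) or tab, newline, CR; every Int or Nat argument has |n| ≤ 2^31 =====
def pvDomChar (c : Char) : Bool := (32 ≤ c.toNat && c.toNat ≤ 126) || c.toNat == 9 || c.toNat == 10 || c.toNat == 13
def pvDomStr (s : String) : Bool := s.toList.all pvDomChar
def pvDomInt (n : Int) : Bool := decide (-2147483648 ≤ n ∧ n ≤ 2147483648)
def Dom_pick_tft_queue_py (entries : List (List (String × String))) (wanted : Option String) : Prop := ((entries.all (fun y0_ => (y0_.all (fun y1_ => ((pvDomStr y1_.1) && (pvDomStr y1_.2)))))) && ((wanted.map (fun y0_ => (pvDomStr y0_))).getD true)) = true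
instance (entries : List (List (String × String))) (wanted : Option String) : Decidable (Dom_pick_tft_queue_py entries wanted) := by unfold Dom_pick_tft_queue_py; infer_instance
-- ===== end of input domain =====

-- B replaces A's priority-major nested scans (one pass over entries per preferred queue) by a
-- single entries-major argmin pass keeping the first entry of minimal preference rank
-- (rank table from enumerate(order)); equivalence is proved on the whole domain (objective: alternative).


-- ===== PORT A =====
-- e.get("queueType"): first-match lookup in the entry's association list (dict convention)
def pvGetQT (e : List (String × String)) : Option String :=
  (e.find? (fun p => p.1 == "queueType")).map (fun p => p.2)

-- alias = (wanted or "").lower(); the three alias branches choosing `order` (identical prologue in A and B)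
def pvAlias (wanted : Option String) : String := PySem.Str.lower (wanted.getD "")

def pvOrder (wanted : Option String) : List String :=
  if pvAlias wanted = "pairs" ∨ pvAlias wanted = "doubleup" ∨ pvAlias wanted = "duo" ∨ pvAlias wanted = "duoqueue" then
    ["RANKED_TFT_PAIRS", "RANKED_TFT", "RANKED_TFT_TURBO"]
  else if pvAlias wanted = "hyper" ∨ pvAlias wanted = "turbo" ∨ pvAlias wanted = "hyp" then
    ["RANKED_TFT_TURBO", "RANKED_TFT", "RANKED_TFT_PAIRS"]
  else
    ["RANKED_TFT", "RANKED_TFT_PAIRS", "RANKED_TFT_TURBO"]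

-- A's nested loops: for q in order: for e in entries: if e.get("queueType")==q: return e
def pvLoopA (entries : List (List (String × String))) : List String → Option (List (String × String))
  | [] => none
  | q :: rest =>
    match entries.find? (fun e => pvGetQT e == some q) with
    | some e => some e
    | none => pvLoopA entries rest

def pick_tft_queue_py (entries : List (List (String × String))) (wanted : Option String) : Option (List (String × String)) :=
  match pvLoopA entries (pvOrder wanted) with
  | some e => some e
  | none => entries.head?   -- entries[0] if entries else None

-- ===== PORT B =====
-- _PREFERRED: alias -> preferred queueType
def pvPreferred : PySem.Dict String String :=
  PySem.Dict.ofList [("pairs", "RANKED_TFT_PAIRS"), ("doubleup", "RANKED_TFT_PAIRS"),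
    ("duo", "RANKED_TFT_PAIRS"), ("duoqueue", "RANKED_TFT_PAIRS"),
    ("hyper", "RANKED_TFT_TURBO"), ("turbo", "RANKED_TFT_TURBO"),
    ("hyp", "RANKED_TFT_TURBO")]

-- top = _PREFERRED.get(alias, "RANKED_TFT")
def pvTop (wanted : Option String) : String :=
  pvPreferred.getD (pvAlias wanted) "RANKED_TFT"

-- order = [top] + [q for q in (default triple) if q != top]
def pvOrderB (wanted : Option String) : List String :=
  [pvTop wanted] ++
    (["RANKED_TFT", "RANKED_TFT_PAIRS", "RANKED_TFT_TURBO"].filter (fun q => q != pvTop wanted))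

-- rank = {q: i for i, q in enumerate(order)}
def pvRankDict (order : List String) : PySem.Dict String Int :=
  (PySem.List.enumerate order).foldl (fun d p => d.insert p.2 p.1) PySem.Dict.empty

-- r = rank.get(e.get("queueType"), n): None is never a key, so a None queueType takes the default
def pvRankOf (rd : PySem.Dict String Int) (n : Int) (e : List (String × String)) : Int :=
  match pvGetQT e with
  | some s => rd.getD s n
  | none => n

-- loop body: if r < best_rank: best, best_rank = e, r
def pvStep (rd : PySem.Dict String Int) (n : Int)
    (acc : Option (List (String × String)) × Int) (e : List (String × String)) :
    Option (List (String × String)) × Int :=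
  if pvRankOf rd n e < acc.2 then (some e, pvRankOf rd n e) else acc

def pick_tft_queue_py_alt (entries : List (List (String × String))) (wanted : Option String) : Option (List (String × String)) :=
  match (entries.foldl (pvStep (pvRankDict (pvOrderB wanted)) (((pvOrderB wanted).length : Int)))
      (none, ((pvOrderB wanted).length : Int))).1 with
  | some e => some e
  | none => entries.head?   -- entries[0] if entries else None

-- ===== PRECONDITION & SPEC =====
def Spec_pick_tft_queue_py (entries : List (List (String × String))) (wanted : Option String) (out : Option (List (String × String))) : Prop := out = pick_tft_queue_py_alt entries wanted
instance (entries : List (List (String × String))) (wanted : Option String) (out : Option (List (String × String))) : Decidable (Spec_pick_tft_queue_py entries wanted out) := by unfold Spec_pick_tft_queue_py; infer_instance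

-- ===== CLAIM =====
def Claim_equal_pick_tft_queue_py : Prop := ∀ (entries : List (List (String × String))) (wanted : Option String), Dom_pick_tft_queue_py entries wanted → Spec_pick_tft_queue_py entries wanted (pick_tft_queue_py entries wanted)

-- ===== LEMMAS AND PROOFS =====

lemma loopA_nil : ∀ qs : List String, pvLoopA [] qs = none := by
  intro qs; induction qs with
  | nil => rfl
  | cons q rest ih => simp [pvLoopA, ih]

-- a new front entry matching none of the queues does not change A's choice
lemma loopA_cons_skip (e : List (String × String)) (es : List (List (String × String))) :
    ∀ qs : List String, (∀ q ∈ qs, pvGetQT e ≠ some q) →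
    pvLoopA (e :: es) qs = pvLoopA es qs := by
  intro qs
  induction qs with
  | nil => intro _; rfl
  | cons q rest ih =>
    intro h
    have hq : (pvGetQT e == some q) = false := by
      simp [h q (List.mem_cons_self)]
    simp only [pvLoopA, List.find?_cons, hq]
    rw [ih (fun q' hq' => h q' (List.mem_cons_of_mem _ hq'))]

-- a new front entry matching q (and nothing earlier) wins unless the tail wins on qs1
lemma loopA_cons_hit (e : List (String × String)) (es : List (List (String × String)))
    (q : String) (qs2 : List String) (h2 : pvGetQT e = some q) :
    ∀ qs1 : List String, (∀ q' ∈ qs1, pvGetQT e ≠ some q') →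
    pvLoopA (e :: es) (qs1 ++ q :: qs2) = (pvLoopA es qs1).or (some e) := by
  intro qs1
  induction qs1 with
  | nil =>
    intro _
    have : (pvGetQT e == some q) = true := by simp [h2]
    simp [pvLoopA, this]
  | cons q' rest ih =>
    intro h1
    have hq' : (pvGetQT e == some q') = false := by
      simp [h1 q' (List.mem_cons_self)]
    simp only [List.cons_append, pvLoopA, List.find?_cons, hq']
    cases hfind : es.find? (fun x => pvGetQT x == some q') with
    | some e' => simp
    | none =>
      exact ih (fun x hx => h1 x (List.mem_cons_of_mem _ hx))

lemma or_some_or (x : Option (List (String × String))) (v : List (String × String))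
    (y : Option (List (String × String))) : ((x.or (some v)).or y) = x.or (some v) := by
  cases x <;> rfl

-- core: the argmin fold over entries computes A's priority scan (generic in the three queue names)
lemma fold_eq_loopA (a b c : String) (rd : PySem.Dict String Int)
    (hrk : ∀ e, pvRankOf rd 3 e =
      if pvGetQT e = some a then 0 else if pvGetQT e = some b then 1
      else if pvGetQT e = some c then 2 else 3) :
    ∀ (es : List (List (String × String))) (best : Option (List (String × String)))
      (br : Int) (q1 : List String),
      ((br = 0 ∧ q1 = []) ∨ (br = 1 ∧ q1 = [a]) ∨ (br = 2 ∧ q1 = [a, b]) ∨ (br = 3 ∧ q1 = [a, b, c])) →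
      (es.foldl (pvStep rd 3) (best, br)).1 = (pvLoopA es q1).or best := by
  intro es
  induction es with
  | nil =>
    intro best br q1 h
    rcases h with ⟨h1, h2⟩ | ⟨h1, h2⟩ | ⟨h1, h2⟩ | ⟨h1, h2⟩ <;> subst h1 <;> subst h2 <;>
      simp [loopA_nil]
  | cons e es ih =>
    intro best br q1 h
    by_cases hA : pvGetQT e = some a
    · have hr : pvRankOf rd 3 e = 0 := by rw [hrk, if_pos hA]
      rcases h with ⟨h1, h2⟩ | ⟨h1, h2⟩ | ⟨h1, h2⟩ | ⟨h1, h2⟩ <;> subst h1 <;> subst h2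
      · -- br = 0: skip
        simp only [List.foldl_cons, pvStep, hr]
        rw [if_neg (by omega)]
        rw [ih best 0 [] (Or.inl ⟨rfl, rfl⟩), loopA_cons_skip e es [] (by simp)]
      · rw [show ([a] : List String) = [] ++ a :: [] from rfl,
          loopA_cons_hit e es a [] hA [] (by simp)]
        simp only [List.foldl_cons, pvStep, hr]
        rw [if_pos (by omega)]
        rw [ih (some e) 0 [] (Or.inl ⟨rfl, rfl⟩), or_some_or]
      · rw [show ([a, b] : List String) = [] ++ a :: [b] from rfl,
          loopA_cons_hit e es a [b] hA [] (by simp)]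
        simp only [List.foldl_cons, pvStep, hr]
        rw [if_pos (by omega)]
        rw [ih (some e) 0 [] (Or.inl ⟨rfl, rfl⟩), or_some_or]
      · rw [show ([a, b, c] : List String) = [] ++ a :: [b, c] from rfl,
          loopA_cons_hit e es a [b, c] hA [] (by simp)]
        simp only [List.foldl_cons, pvStep, hr]
        rw [if_pos (by omega)]
        rw [ih (some e) 0 [] (Or.inl ⟨rfl, rfl⟩), or_some_or]
    · by_cases hB : pvGetQT e = some b
      · have hr : pvRankOf rd 3 e = 1 := by rw [hrk, if_neg hA, if_pos hB]
        rcases h with ⟨h1, h2⟩ | ⟨h1, h2⟩ | ⟨h1, h2⟩ | ⟨h1, h2⟩ <;> subst h1 <;> subst h2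
        · simp only [List.foldl_cons, pvStep, hr]
          rw [if_neg (by omega)]
          rw [ih best 0 [] (Or.inl ⟨rfl, rfl⟩), loopA_cons_skip e es [] (by simp)]
        · simp only [List.foldl_cons, pvStep, hr]
          rw [if_neg (by omega)]
          rw [ih best 1 [a] (Or.inr (Or.inl ⟨rfl, rfl⟩)),
            loopA_cons_skip e es [a] (by simpa using hA)]
        · rw [show ([a, b] : List String) = [a] ++ b :: [] from rfl,
            loopA_cons_hit e es b [] hB [a] (by simpa using hA)]
          simp only [List.foldl_cons, pvStep, hr]
          rw [if_pos (by omega)]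
          rw [ih (some e) 1 [a] (Or.inr (Or.inl ⟨rfl, rfl⟩)), or_some_or]
        · rw [show ([a, b, c] : List String) = [a] ++ b :: [c] from rfl,
            loopA_cons_hit e es b [c] hB [a] (by simpa using hA)]
          simp only [List.foldl_cons, pvStep, hr]
          rw [if_pos (by omega)]
          rw [ih (some e) 1 [a] (Or.inr (Or.inl ⟨rfl, rfl⟩)), or_some_or]
      · by_cases hC : pvGetQT e = some c
        · have hr : pvRankOf rd 3 e = 2 := by rw [hrk, if_neg hA, if_neg hB, if_pos hC]
          rcases h with ⟨h1, h2⟩ | ⟨h1, h2⟩ | ⟨h1, h2⟩ | ⟨h1, h2⟩ <;> subst h1 <;> subst h2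
          · simp only [List.foldl_cons, pvStep, hr]
            rw [if_neg (by omega)]
            rw [ih best 0 [] (Or.inl ⟨rfl, rfl⟩), loopA_cons_skip e es [] (by simp)]
          · simp only [List.foldl_cons, pvStep, hr]
            rw [if_neg (by omega)]
            rw [ih best 1 [a] (Or.inr (Or.inl ⟨rfl, rfl⟩)),
              loopA_cons_skip e es [a] (by simpa using hA)]
          · simp only [List.foldl_cons, pvStep, hr]
            rw [if_neg (by omega)]
            rw [ih best 2 [a, b] (Or.inr (Or.inr (Or.inl ⟨rfl, rfl⟩)))]
            rw [loopA_cons_skip e es [a, b] (by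
              intro q hq
              simp only [List.mem_cons, List.not_mem_nil, or_false] at hq
              rcases hq with rfl | rfl
              · exact hA
              · exact hB)]
          · rw [show ([a, b, c] : List String) = [a, b] ++ c :: [] from rfl,
              loopA_cons_hit e es c [] hC [a, b] (by
                intro q hq
                simp only [List.mem_cons, List.not_mem_nil, or_false] at hq
                rcases hq with rfl | rfl
                · exact hA
                · exact hB)]
            simp only [List.foldl_cons, pvStep, hr]
            rw [if_pos (by omega)]
            rw [ih (some e) 2 [a, b] (Or.inr (Or.inr (Or.inl ⟨rfl, rfl⟩))), or_some_or]
        · -- rank 3: never beats any state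
          have hr : pvRankOf rd 3 e = 3 := by rw [hrk, if_neg hA, if_neg hB, if_neg hC]
          have hskip : ∀ q1', (∀ q ∈ q1', q = a ∨ q = b ∨ q = c) →
              pvLoopA (e :: es) q1' = pvLoopA es q1' := by
            intro q1' hmem
            refine loopA_cons_skip e es q1' (fun q hq => ?_)
            rcases hmem q hq with h | h | h <;> subst h <;> assumption
          rcases h with ⟨h1, h2⟩ | ⟨h1, h2⟩ | ⟨h1, h2⟩ | ⟨h1, h2⟩ <;> subst h1 <;> subst h2 <;>
            simp only [List.foldl_cons, pvStep, hr] <;> rw [if_neg (by omega)]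
          · rw [ih best 0 [] (Or.inl ⟨rfl, rfl⟩), hskip [] (by simp)]
          · rw [ih best 1 [a] (Or.inr (Or.inl ⟨rfl, rfl⟩)), hskip [a] (by simp)]
          · rw [ih best 2 [a, b] (Or.inr (Or.inr (Or.inl ⟨rfl, rfl⟩))),
              hskip [a, b] (by intro q hq; simp only [List.mem_cons, List.not_mem_nil, or_false] at hq; tauto)]
          · rw [ih best 3 [a, b, c] (Or.inr (Or.inr (Or.inr ⟨rfl, rfl⟩))),
              hskip [a, b, c] (by intro q hq; simp only [List.mem_cons, List.not_mem_nil, or_false] at hq; tauto)]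

-- the rank table of a concrete 3-element order answers the if-chain on queueType
lemma rankOf_concrete (a b c : String) (hab : a ≠ b) (hac : a ≠ c) (hbc : b ≠ c) (e : List (String × String)) :
    pvRankOf (pvRankDict [a, b, c]) 3 e =
      if pvGetQT e = some a then 0 else if pvGetQT e = some b then 1
      else if pvGetQT e = some c then 2 else 3 := by
  have hd : pvRankDict [a, b, c] =
      ((PySem.Dict.empty.insert a 0).insert b 1).insert c 2 := by
    simp [pvRankDict, PySem.List.enumerate]
  cases hqt : pvGetQT e with
  | none => simp [pvRankOf, hqt]
  | some s =>
    have hred : pvRankOf (pvRankDict [a, b, c]) 3 e =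
        ((((PySem.Dict.empty.insert a 0).insert b 1).insert c 2).getD s 3) := by
      unfold pvRankOf
      rw [hqt, hd]
    rw [hred]
    simp only [Option.some.injEq]
    simp only [PySem.Dict.getD_insert, PySem.Dict.getD_empty]
    split_ifs <;> simp_all

lemma pvOrder_cases (wanted : Option String) :
    pvOrder wanted = ["RANKED_TFT_PAIRS", "RANKED_TFT", "RANKED_TFT_TURBO"] ∨
    pvOrder wanted = ["RANKED_TFT_TURBO", "RANKED_TFT", "RANKED_TFT_PAIRS"] ∨
    pvOrder wanted = ["RANKED_TFT", "RANKED_TFT_PAIRS", "RANKED_TFT_TURBO"] := by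
  unfold pvOrder
  split_ifs <;> simp

-- B's rotation of the default triple produces exactly A's three branch lists
lemma orderB_eq (wanted : Option String) : pvOrderB wanted = pvOrder wanted := by
  unfold pvOrderB pvTop pvOrder
  split_ifs with h1 h2
  · rcases h1 with h | h | h | h <;> rw [h] <;> decide
  · rcases h2 with h | h | h <;> rw [h] <;> decide
  · rw [not_or, not_or, not_or] at h1
    rw [not_or, not_or] at h2
    obtain ⟨hp, hd, hu, hq⟩ := h1
    obtain ⟨hh, ht, hy⟩ := h2
    have hpd : pvPreferred = PySem.Dict.mk [("pairs", "RANKED_TFT_PAIRS"),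
      ("doubleup", "RANKED_TFT_PAIRS"), ("duo", "RANKED_TFT_PAIRS"),
      ("duoqueue", "RANKED_TFT_PAIRS"), ("hyper", "RANKED_TFT_TURBO"),
      ("turbo", "RANKED_TFT_TURBO"), ("hyp", "RANKED_TFT_TURBO")] := by decide
    have f1 : ("pairs" == pvAlias wanted) = false := by
      rw [beq_eq_false_iff_ne]; exact fun h => hp h.symm
    have f2 : ("doubleup" == pvAlias wanted) = false := by
      rw [beq_eq_false_iff_ne]; exact fun h => hd h.symm
    have f3 : ("duo" == pvAlias wanted) = false := by
      rw [beq_eq_false_iff_ne]; exact fun h => hu h.symm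
    have f4 : ("duoqueue" == pvAlias wanted) = false := by
      rw [beq_eq_false_iff_ne]; exact fun h => hq h.symm
    have f5 : ("hyper" == pvAlias wanted) = false := by
      rw [beq_eq_false_iff_ne]; exact fun h => hh h.symm
    have f6 : ("turbo" == pvAlias wanted) = false := by
      rw [beq_eq_false_iff_ne]; exact fun h => ht h.symm
    have f7 : ("hyp" == pvAlias wanted) = false := by
      rw [beq_eq_false_iff_ne]; exact fun h => hy h.symm
    rw [hpd, PySem.Dict.getD_eq_get?_getD]
    simp only [PySem.Dict.get?_mk_cons, f1, f2, f3, f4, f5, f6, f7, Bool.false_eq_true,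
      if_false]
    rfl

lemma alt_eq (entries : List (List (String × String))) (wanted : Option String) :
    pick_tft_queue_py entries wanted = pick_tft_queue_py_alt entries wanted := by
  unfold pick_tft_queue_py pick_tft_queue_py_alt
  rw [orderB_eq]
  rcases pvOrder_cases wanted with h | h | h <;> rw [h] <;>
  · rw [show (([_, _, _] : List String).length : Int) = 3 from rfl]
    rw [fold_eq_loopA _ _ _ _
      (rankOf_concrete _ _ _ (by decide) (by decide) (by decide))
      entries none 3 _ (Or.inr (Or.inr (Or.inr ⟨rfl, rfl⟩)))]
    cases pvLoopA entries _ <;> rfl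

-- ===== VERDICT =====
theorem pick_tft_queue_py_spec : Claim_equal_pick_tft_queue_py := by
  intro entries wanted _
  unfold Spec_pick_tft_queue_py
  exact alt_eq entries wanted
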